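-- pv_equiv track=rewrite | github.com/mariosaez-upct-es/calculadora-recursos-brawl | prorotipo_v1.py | calcular_recursos_brawler
-- ===== SOURCE A (Python) =====
-- def calcular_recursos_brawler(nivel_actual, nivel_deseado, gadgets, star_powers, hypercharge, refuerzos=0):
--     """No se tienen en cuenta refuerzos míticos o épicos.
--     Función que recibe los parámetros del brawler que se desea subir de nivel y devuelve los recursos necesarios para ello.
--     Args:
--         nivel_actual (int): Nivel actual del brawler.
--         nivel_deseado (int): Nivel al que se desea subir el brawler.
--         gadgets (int): Cantidad de gadgets que se desean comprar.
--         star_powers (int): Cantidad de star powers que se desean comprar.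
--         hypercharge (bool): Indica si se desea comprar la hipercarga.
--         refuerzos (int): Cantidad de refuerzos que se desean comprar.
--     Returns:
--         monedas (int): Cantidad de monedas necesarias para subir de nivel el brawler.
--         puntos_fuerza (int): Cantidad de puntos de fuerza necesarios para subir de nivel el brawler.
--     """
--     ## Comprobaciones de integridad
--
--     assert nivel_actual >= 1 and nivel_actual <= 11
--     assert nivel_deseado >= 2 and nivel_deseado <= 11
--     assert nivel_actual <= nivel_deseado
--     assert isinstance(gadgets, int) and gadgets >= 0 and gadgets < 3
--     assert isinstance(star_powers, int) and star_powers >= 0 and star_powers <= 2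
--     assert isinstance(hypercharge, bool)
--     assert isinstance(refuerzos, int) and refuerzos >= 0 and refuerzos < 6
--
--     ### Recursos necesarios para subir de nivel
--     level = [(20, 20), (35, 30), (75, 50), (140, 80), (290, 130), (480, 210), (800, 340), (1250, 550), (1875, 890), (2800, 1440)]
--
--     monedas = 0
--     puntos_fuerza = 0
--
--     #### Cálculos nivel
--     for i in range(nivel_actual, nivel_deseado):
--         monedas += level[i - 1][0]
--         puntos_fuerza += level[i - 1][1]
--
--     #### Cálculos gadgets
--     monedas += gadgets * 1000
--
--     #### Cálculos star powers
--     monedas += star_powers * 2000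
--
--     #### Cálculos hypercharge
--     if hypercharge:
--         monedas += 5000
--
--     #### Cálculos refuerzos
--     for i in range(refuerzos):
--         monedas += 1000
--
--     return monedas, puntos_fuerza
-- ===== SOURCE B (Python) =====
-- def calcular_recursos_brawler(nivel_actual, nivel_deseado, gadgets, star_powers, hypercharge, refuerzos=0):
--     """Prefix-sum reimplementation: cumulative coin/power tables replace the per-level loop."""
--     assert nivel_actual >= 1 and nivel_actual <= 11
--     assert nivel_deseado >= 2 and nivel_deseado <= 11
--     assert nivel_actual <= nivel_deseado
--     assert isinstance(gadgets, int) and gadgets >= 0 and gadgets < 3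
--     assert isinstance(star_powers, int) and star_powers >= 0 and star_powers <= 2
--     assert isinstance(hypercharge, bool)
--     assert isinstance(refuerzos, int) and refuerzos >= 0 and refuerzos < 6
--
--     level = [(20, 20), (35, 30), (75, 50), (140, 80), (290, 130), (480, 210), (800, 340), (1250, 550), (1875, 890), (2800, 1440)]
--
--     # cum_coins[k] / cum_power[k] = total cost to go from level 1 to level k+1
--     cum_coins = [0]
--     cum_power = [0]
--     for c, p in level:
--         cum_coins.append(cum_coins[-1] + c)
--         cum_power.append(cum_power[-1] + p)
--
--     monedas = (cum_coins[nivel_deseado - 1] - cum_coins[nivel_actual - 1]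
--                + gadgets * 1000 + star_powers * 2000
--                + (5000 if hypercharge else 0) + refuerzos * 1000)
--     puntos_fuerza = cum_power[nivel_deseado - 1] - cum_power[nivel_actual - 1]
--     return monedas, puntos_fuerza
-- ===== Notes on version B (the rewrite author's own statement) =====
-- stated objective: alternative
-- what changed: Builds cumulative prefix-sum tables of the level costs once and replaces the per-level loop with a single difference of two table entries, and the refuerzos loop with refuerzos*1000.
import Mathlib
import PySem

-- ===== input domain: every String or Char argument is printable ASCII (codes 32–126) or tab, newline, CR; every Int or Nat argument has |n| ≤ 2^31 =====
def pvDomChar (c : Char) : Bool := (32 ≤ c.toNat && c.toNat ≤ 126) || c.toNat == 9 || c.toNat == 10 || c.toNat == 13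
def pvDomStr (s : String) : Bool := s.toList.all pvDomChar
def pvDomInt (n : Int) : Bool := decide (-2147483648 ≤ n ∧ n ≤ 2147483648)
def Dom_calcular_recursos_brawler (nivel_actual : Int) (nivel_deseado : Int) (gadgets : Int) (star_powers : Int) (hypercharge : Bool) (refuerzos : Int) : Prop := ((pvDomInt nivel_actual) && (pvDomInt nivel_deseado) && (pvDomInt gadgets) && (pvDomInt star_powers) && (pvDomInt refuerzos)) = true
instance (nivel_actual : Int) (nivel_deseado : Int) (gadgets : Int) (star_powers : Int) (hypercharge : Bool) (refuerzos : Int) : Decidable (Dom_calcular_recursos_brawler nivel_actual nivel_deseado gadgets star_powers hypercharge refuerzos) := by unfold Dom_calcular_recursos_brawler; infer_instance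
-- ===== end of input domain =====

-- B replaces A's per-level and per-refuerzo loops by prefix-sum tables and arithmetic (alternative decomposition, same cost class).

-- ===== PORT A =====
def pvLevel : List (Int × Int) := [(20, 20), (35, 30), (75, 50), (140, 80), (290, 130), (480, 210), (800, 340), (1250, 550), (1875, 890), (2800, 1440)]

def calcular_recursos_brawler (nivel_actual : Int) (nivel_deseado : Int) (gadgets : Int) (star_powers : Int) (hypercharge : Bool) (refuerzos : Int) : Int × Int :=
  -- for i in range(nivel_actual, nivel_deseado): monedas += level[i-1][0]; puntos_fuerza += level[i-1][1]
  let st := (PySem.List.pyRange nivel_actual nivel_deseado 1).foldl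
      (fun (mp : Int × Int) i =>
        (mp.1 + (PySem.List.pyGetD pvLevel (i - 1) (0, 0)).1,
         mp.2 + (PySem.List.pyGetD pvLevel (i - 1) (0, 0)).2)) (0, 0)
  let monedas := st.1 + gadgets * 1000
  let monedas := monedas + star_powers * 2000
  let monedas := if hypercharge then monedas + 5000 else monedas
  -- for i in range(refuerzos): monedas += 1000
  let monedas := (PySem.List.pyRange 0 refuerzos 1).foldl (fun m _ => m + 1000) monedas
  (monedas, st.2)

-- ===== PORT B =====
def calcular_recursos_brawler_alt (nivel_actual : Int) (nivel_deseado : Int) (gadgets : Int) (star_powers : Int) (hypercharge : Bool) (refuerzos : Int) : Int × Int :=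
  -- prefix-sum tables: cum[k] = total cost to go from level 1 to level k+1
  let cums := pvLevel.foldl
      (fun (cc : List Int × List Int) cp =>
        (cc.1 ++ [PySem.List.pyGetD cc.1 (-1) 0 + cp.1],
         cc.2 ++ [PySem.List.pyGetD cc.2 (-1) 0 + cp.2])) ([0], [0])
  let monedas := PySem.List.pyGetD cums.1 (nivel_deseado - 1) 0 - PySem.List.pyGetD cums.1 (nivel_actual - 1) 0
      + gadgets * 1000 + star_powers * 2000 + (if hypercharge then 5000 else 0) + refuerzos * 1000
  let puntos := PySem.List.pyGetD cums.2 (nivel_deseado - 1) 0 - PySem.List.pyGetD cums.2 (nivel_actual - 1) 0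
  (monedas, puntos)

-- ===== PRECONDITION & SPEC =====
-- Pre_ = exactly the asserts of the Python: outside them both programs raise AssertionError.
def Pre_calcular_recursos_brawler (nivel_actual : Int) (nivel_deseado : Int) (gadgets : Int) (star_powers : Int) (hypercharge : Bool) (refuerzos : Int) : Prop :=
  1 ≤ nivel_actual ∧ nivel_actual ≤ 11 ∧ 2 ≤ nivel_deseado ∧ nivel_deseado ≤ 11 ∧
  nivel_actual ≤ nivel_deseado ∧ 0 ≤ gadgets ∧ gadgets < 3 ∧ 0 ≤ star_powers ∧ star_powers ≤ 2 ∧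
  0 ≤ refuerzos ∧ refuerzos < 6
instance (nivel_actual : Int) (nivel_deseado : Int) (gadgets : Int) (star_powers : Int) (hypercharge : Bool) (refuerzos : Int) : Decidable (Pre_calcular_recursos_brawler nivel_actual nivel_deseado gadgets star_powers hypercharge refuerzos) := by unfold Pre_calcular_recursos_brawler; infer_instance

def pvWitness_calcular_recursos_brawler : Int × Int × Int × Int × Bool × Int := (3, 9, 1, 2, true, 4)

def Spec_calcular_recursos_brawler (nivel_actual : Int) (nivel_deseado : Int) (gadgets : Int) (star_powers : Int) (hypercharge : Bool) (refuerzos : Int) (out : Int × Int) : Prop := out = calcular_recursos_brawler_alt nivel_actual nivel_deseado gadgets star_powers hypercharge refuerzos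
instance (nivel_actual : Int) (nivel_deseado : Int) (gadgets : Int) (star_powers : Int) (hypercharge : Bool) (refuerzos : Int) (out : Int × Int) : Decidable (Spec_calcular_recursos_brawler nivel_actual nivel_deseado gadgets star_powers hypercharge refuerzos out) := by unfold Spec_calcular_recursos_brawler; infer_instance

-- ===== CLAIM (what is proved, stated in full; the proofs are below) =====
def Claim_equal_calcular_recursos_brawler : Prop := ∀ (nivel_actual : Int) (nivel_deseado : Int) (gadgets : Int) (star_powers : Int) (hypercharge : Bool) (refuerzos : Int), Dom_calcular_recursos_brawler nivel_actual nivel_deseado gadgets star_powers hypercharge refuerzos → Pre_calcular_recursos_brawler nivel_actual nivel_deseado gadgets star_powers hypercharge refuerzos → Spec_calcular_recursos_brawler nivel_actual nivel_deseado gadgets star_powers hypercharge refuerzos (calcular_recursos_brawler nivel_actual nivel_deseado gadgets star_powers hypercharge refuerzos)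

-- ===== LEMMAS AND PROOFS =====
-- the concrete prefix-sum tables that B's fold over pvLevel produces
def pvCC : List Int := [0, 20, 55, 130, 270, 560, 1040, 1840, 3090, 4965, 7765]
def pvCP : List Int := [0, 20, 50, 100, 180, 310, 520, 860, 1410, 2300, 3740]

lemma pvCumsEq : pvLevel.foldl
    (fun (cc : List Int × List Int) cp =>
      (cc.1 ++ [PySem.List.pyGetD cc.1 (-1) 0 + cp.1],
       cc.2 ++ [PySem.List.pyGetD cc.2 (-1) 0 + cp.2])) ([0], [0]) = (pvCC, pvCP) := by
  decide

-- folding a constant +1000 over any list adds 1000 * length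
lemma pvFoldConst (l : List Int) (m : Int) : l.foldl (fun acc _ => acc + 1000) m = m + 1000 * l.length := by
  induction l generalizing m with
  | nil => simp
  | cons x xs ih => simp [List.foldl, ih]; ring

-- shifting the accumulator out of A's level fold
lemma pvShift (l : List Int) (m p : Int) :
    l.foldl (fun (mp : Int × Int) i =>
        (mp.1 + (PySem.List.pyGetD pvLevel (i - 1) (0, 0)).1,
         mp.2 + (PySem.List.pyGetD pvLevel (i - 1) (0, 0)).2)) (m, p)
      = (m + (l.foldl (fun (mp : Int × Int) i =>
        (mp.1 + (PySem.List.pyGetD pvLevel (i - 1) (0, 0)).1,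
         mp.2 + (PySem.List.pyGetD pvLevel (i - 1) (0, 0)).2)) (0, 0)).1,
         p + (l.foldl (fun (mp : Int × Int) i =>
        (mp.1 + (PySem.List.pyGetD pvLevel (i - 1) (0, 0)).1,
         mp.2 + (PySem.List.pyGetD pvLevel (i - 1) (0, 0)).2)) (0, 0)).2) := by
  induction l generalizing m p with
  | nil => simp
  | cons x xs ih =>
    simp only [List.foldl]
    rw [ih, ih (0 + (PySem.List.pyGetD pvLevel (x - 1) (0, 0)).1) _]
    simp [Prod.ext_iff]
    constructor <;> ring

-- one level's cost is the difference of adjacent prefix-table entries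
lemma pvStep (i : Int) (h1 : 1 ≤ i) (h2 : i ≤ 10) :
    (PySem.List.pyGetD pvLevel (i - 1) (0, 0)).1
        = PySem.List.pyGetD pvCC i 0 - PySem.List.pyGetD pvCC (i - 1) 0
    ∧ (PySem.List.pyGetD pvLevel (i - 1) (0, 0)).2
        = PySem.List.pyGetD pvCP i 0 - PySem.List.pyGetD pvCP (i - 1) 0 := by
  interval_cases i <;> exact ⟨by decide, by decide⟩

-- A's level loop telescopes to a difference of prefix-table entries
lemma pvMain (k : Nat) : ∀ (na : Int), 1 ≤ na → na + k ≤ 11 →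
    (PySem.List.pyRange na (na + k) 1).foldl (fun (mp : Int × Int) i =>
        (mp.1 + (PySem.List.pyGetD pvLevel (i - 1) (0, 0)).1,
         mp.2 + (PySem.List.pyGetD pvLevel (i - 1) (0, 0)).2)) (0, 0)
      = (PySem.List.pyGetD pvCC (na + k - 1) 0 - PySem.List.pyGetD pvCC (na - 1) 0,
         PySem.List.pyGetD pvCP (na + k - 1) 0 - PySem.List.pyGetD pvCP (na - 1) 0) := by
  induction k with
  | zero =>
    intro na _ _
    rw [PySem.List.pyRange_one_eq_nil (by omega)]
    simp
  | succ k ih =>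
    intro na h1 h2
    rw [PySem.List.pyRange_one_cons (by push_cast; omega)]
    simp only [List.foldl]
    rw [pvShift]
    have hk : na + 1 + (k : Int) = na + ((k : Nat) + 1 : Nat) := by push_cast; ring
    have := ih (na + 1) (by omega) (by push_cast at h2 ⊢; omega)
    rw [hk] at this
    rw [this]
    obtain ⟨e1, e2⟩ := pvStep na h1 (by push_cast at h2; omega)
    apply Prod.ext <;> simp [e1, e2]

-- ===== VERDICT (by name: the statement is the Claim_ definition above) =====
theorem calcular_recursos_brawler_spec : Claim_equal_calcular_recursos_brawler := by
  intro na nd g sp h r _ hpre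
  obtain ⟨h1, h2, h3, h4, h5, h6, h7, h8, h9, h10, h11⟩ := hpre
  unfold Spec_calcular_recursos_brawler calcular_recursos_brawler calcular_recursos_brawler_alt
  have hnd : nd = na + ((nd - na).toNat : Int) := by omega
  simp only [pvCumsEq, pvFoldConst, PySem.List.length_pyRange_one]
  rw [hnd, pvMain (nd - na).toNat na h1 (by omega)]
  cases h <;> simp <;> omega
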